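-- pv_equiv track=rewrite | github.com/msg-bq/semantic_parsing | utils/text_utils.py | find_long_string_in_list
-- ===== SOURCE A (Python) =====
-- def find_long_string_in_list(lst, target_string):
--     indexes = []
--     for i in range(len(lst)):
--         # 将从当前位置开始的列表元素合并成字符串，同时忽略空字符串
--         for j in range(i, len(lst)):
--             combined = ''.join([x for x in lst[i:j + 1] if x != ''])
--             # 如果合并后的字符串与目标字符串匹配
--             if combined == target_string:
--                 # 仅添加非空字符串的索引
--                 indexes.extend([k for k in range(i, j + 1) if lst[k] != ''])
--                 return indexes
--             # 如果合并后的字符串长度已经超过目标字符串，不再继续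
--             if len(combined) > len(target_string):
--                 break
--     # if len(indexes) > 2:
--     #     indexes = [indexes[0],indexes[-1]]
--
--     return indexes
-- ===== SOURCE B (Python) =====
-- def find_long_string_in_list(lst, target_string):
--     n = len(lst)
--     L = len(target_string)
--     for i in range(n):
--         pos = 0
--         idxs = []
--         for j in range(i, n):
--             e = lst[j]
--             if e != '':
--                 if target_string[pos:pos + len(e)] != e:
--                     break
--                 pos += len(e)
--                 idxs.append(j)
--             if pos == L:
--                 return idxs
--     return []
-- ===== Notes on version B (the rewrite author's own statement) =====
-- stated objective: faster
-- what changed: Instead of re-joining the whole window slice at every inner step, B matches each list element incrementally against the corresponding slice of the target (a running match position), appending indexes as it goes, so no intermediate joined strings are ever built.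
import Mathlib
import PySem

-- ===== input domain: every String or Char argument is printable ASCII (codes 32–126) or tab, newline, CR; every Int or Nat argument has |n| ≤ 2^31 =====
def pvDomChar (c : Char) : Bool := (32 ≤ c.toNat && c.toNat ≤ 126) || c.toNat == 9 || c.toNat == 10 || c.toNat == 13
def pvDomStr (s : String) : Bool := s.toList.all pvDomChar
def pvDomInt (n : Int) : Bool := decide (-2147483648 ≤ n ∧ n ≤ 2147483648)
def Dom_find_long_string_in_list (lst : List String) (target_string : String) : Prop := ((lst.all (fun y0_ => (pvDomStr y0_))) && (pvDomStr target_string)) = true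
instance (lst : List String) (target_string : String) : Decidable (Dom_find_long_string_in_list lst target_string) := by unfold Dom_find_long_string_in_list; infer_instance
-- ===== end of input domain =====

-- B replaces A's per-step re-join of the whole window slice by an incremental match position
-- into the target; equivalence of the return values is proved (no mutation involved).

-- ===== PORT A =====
-- inner 'for j' loop: the window lst[i:j+1] is carried as the list of (index, element)
-- pairs processed so far; each step re-joins the whole window, exactly as A does.
def pvAInner (target : String) : List (Int × String) → List (Int × String) → Option (List Int)
  | _, [] => none
  | window, p :: rest =>
    if PySem.Str.join "" (((window ++ [p]).map Prod.snd).filter (fun x => x ≠ "")) = target then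
      some (((window ++ [p]).filter (fun q => q.2 ≠ "")).map Prod.fst)
    else if PySem.Str.len (PySem.Str.join "" (((window ++ [p]).map Prod.snd).filter (fun x => x ≠ ""))) > PySem.Str.len target then
      none
    else
      pvAInner target (window ++ [p]) rest

-- outer 'for i' loop over the start positions = over the suffixes of the enumerated list
def pvAOuter (target : String) : List (Int × String) → List Int
  | [] => []
  | p :: rest =>
    match pvAInner target [] (p :: rest) with
    | some r => r
    | none => pvAOuter target rest

def find_long_string_in_list (lst : List String) (target_string : String) : List Int :=
  pvAOuter target_string (PySem.List.enumerate lst 0)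

-- ===== PORT B =====
-- inner loop of B: running match position pos into target, collected indexes idxs
def pvBInner (target : String) : Int → List Int → List (Int × String) → Option (List Int)
  | _, _, [] => none
  | pos, idxs, (k, e) :: rest =>
    if e ≠ "" then
      if PySem.Str.slice target (some pos) (some (pos + PySem.Str.len e)) ≠ e then
        none
      else if pos + PySem.Str.len e = PySem.Str.len target then
        some (idxs ++ [k])
      else
        pvBInner target (pos + PySem.Str.len e) (idxs ++ [k]) rest
    else
      if pos = PySem.Str.len target then some idxs else pvBInner target pos idxs rest

def pvBOuter (target : String) : List (Int × String) → List Int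
  | [] => []
  | p :: rest =>
    match pvBInner target 0 [] (p :: rest) with
    | some r => r
    | none => pvBOuter target rest

def find_long_string_in_list_alt (lst : List String) (target_string : String) : List Int :=
  pvBOuter target_string (PySem.List.enumerate lst 0)

-- ===== PRECONDITION & SPEC =====
def Spec_find_long_string_in_list (lst : List String) (target_string : String) (out : List Int) : Prop := out = find_long_string_in_list_alt lst target_string
instance (lst : List String) (target_string : String) (out : List Int) : Decidable (Spec_find_long_string_in_list lst target_string out) := by unfold Spec_find_long_string_in_list; infer_instance

-- ===== CLAIM (what is proved, stated in full; the proofs are below) =====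
def Claim_equal_find_long_string_in_list : Prop := ∀ (lst : List String) (target_string : String), Dom_find_long_string_in_list lst target_string → Spec_find_long_string_in_list lst target_string (find_long_string_in_list lst target_string)

-- ===== LEMMAS AND PROOFS =====

-- the characters of the joined non-empty elements of a window
def pvChars (w : List (Int × String)) : List Char :=
  ((w.map Prod.snd).map String.toList).flatten

lemma pv_join_nil_flatten (parts : List (List Char)) :
    PySem.Chars.join [] parts = parts.flatten := by
  simp [PySem.Chars.join, List.intercalate]
  induction parts with
  | nil => simp
  | cons p ps ih => cases ps <;> simp_all [List.intersperse]

lemma pv_flatten_filter (ws : List String) :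
    (((ws.filter (fun x => x ≠ "")).map String.toList)).flatten
      = (ws.map String.toList).flatten := by
  induction ws with
  | nil => rfl
  | cons s ws ih =>
    by_cases hs : s = ""
    · subst hs; simpa using ih
    · simpa [hs] using ih

-- the combined string A builds for a window has exactly the window's characters
lemma pv_combined_toList (w : List (Int × String)) :
    (PySem.Str.join "" ((w.map Prod.snd).filter (fun x => x ≠ ""))).toList = pvChars w := by
  rw [PySem.Str.toList_join]
  show PySem.Chars.join "".toList _ = _
  rw [show ("" : String).toList = [] from rfl, pv_join_nil_flatten, pv_flatten_filter]
  rfl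

lemma pvChars_append (w : List (Int × String)) (p : Int × String) :
    pvChars (w ++ [p]) = pvChars w ++ p.2.toList := by
  simp [pvChars]

-- once the window's characters are not a prefix of the target, A's inner loop returns none
lemma pvAInner_none (target : String) (w rest : List (Int × String))
    (h : ¬ pvChars w <+: target.toList) :
    pvAInner target w rest = none := by
  induction rest generalizing w with
  | nil => rfl
  | cons p rest ih =>
    have hcomb := pv_combined_toList (w ++ [p])
    rw [pvAInner]
    have hne : ¬ (PySem.Str.join "" (((w ++ [p]).map Prod.snd).filter (fun x => x ≠ "")) = target) := by
      intro he
      apply h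
      have : pvChars (w ++ [p]) = target.toList := by rw [← hcomb, he]
      rw [pvChars_append] at this
      exact ⟨p.2.toList, this⟩
    rw [if_neg hne]
    split
    · rfl
    · apply ih
      intro hpre
      apply h
      rw [pvChars_append] at hpre
      exact (List.prefix_append _ _).trans hpre

-- filter/map of a window extended by one pair
lemma pv_filter_snoc_ne (w : List (Int × String)) (k : Int) (e : String) (he : e ≠ "") :
    ((w ++ [(k, e)]).filter (fun q => q.2 ≠ "")).map Prod.fst
      = (w.filter (fun q => q.2 ≠ "")).map Prod.fst ++ [k] := by
  simp [List.filter_append, he]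

lemma pv_filter_snoc_eq (w : List (Int × String)) (k : Int) :
    ((w ++ [(k, "")]).filter (fun q => q.2 ≠ "")).map Prod.fst
      = (w.filter (fun q => q.2 ≠ "")).map Prod.fst := by
  simp [List.filter_append]

-- core invariant lemma: A's and B's inner loops agree
lemma pv_inner_eq (target : String) (w rest : List (Int × String)) (pos : Nat)
    (hpos : pos ≤ target.toList.length)
    (hcs : pvChars w = target.toList.take pos) :
    pvAInner target w rest
      = pvBInner target (pos : Int) ((w.filter (fun q => q.2 ≠ "")).map Prod.fst) rest := by
  induction rest generalizing w pos with
  | nil => rfl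
  | cons p rest ih =>
    obtain ⟨k, e⟩ := p
    have hLt : PySem.Str.len target = (target.toList.length : Int) := PySem.Str.len_eq target
    have hlenE : PySem.Str.len e = (e.toList.length : Int) := PySem.Str.len_eq e
    have hcombL : (PySem.Str.join "" (((w ++ [(k, e)]).map Prod.snd).filter (fun x => x ≠ ""))).toList
        = target.toList.take pos ++ e.toList := by
      rw [pv_combined_toList, pvChars_append, hcs]
    have htakelen : (target.toList.take pos).length = pos := by
      rw [List.length_take]; exact Nat.min_eq_left hpos
    rw [pvAInner, pvBInner]
    by_cases he : e = ""
    · subst he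
      rw [show ("" : String).toList = [] from rfl, List.append_nil] at hcombL
      have hlenC : PySem.Str.len (PySem.Str.join "" (((w ++ [(k, "")]).map Prod.snd).filter (fun x => x ≠ ""))) = (pos : Int) := by
        rw [PySem.Str.len_eq, hcombL, htakelen]
      by_cases hpL : pos = target.toList.length
      · have hA1 : PySem.Str.join "" (((w ++ [(k, "")]).map Prod.snd).filter (fun x => x ≠ "")) = target := by
          rw [← String.toList_inj, hcombL, hpL, List.take_length]
        have hB2 : (pos : Int) = PySem.Str.len target := by rw [hLt]; exact_mod_cast hpL
        rw [if_pos hA1, if_neg (fun h => h rfl), if_pos hB2, pv_filter_snoc_eq]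
      · have hlt : pos < target.toList.length := lt_of_le_of_ne hpos hpL
        have hA1 : ¬ (PySem.Str.join "" (((w ++ [(k, "")]).map Prod.snd).filter (fun x => x ≠ "")) = target) := by
          intro hcontra
          rw [← String.toList_inj, hcombL] at hcontra
          have := congrArg List.length hcontra
          rw [htakelen] at this
          omega
        have hA2 : ¬ (PySem.Str.len (PySem.Str.join "" (((w ++ [(k, "")]).map Prod.snd).filter (fun x => x ≠ ""))) > PySem.Str.len target) := by
          rw [hlenC, hLt]
          exact not_lt.mpr (Int.ofNat_le.mpr (le_of_lt hlt))
        have hB2 : ¬ ((pos : Int) = PySem.Str.len target) := by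
          rw [hLt]; exact_mod_cast hpL
        rw [if_neg hA1, if_neg hA2, if_neg (fun h => h rfl), if_neg hB2]
        have hih := ih (w ++ [(k, "")]) pos hpos (by rw [pvChars_append, hcs]; simp)
        rw [hih, pv_filter_snoc_eq]
    · have hlenC : PySem.Str.len (PySem.Str.join "" (((w ++ [(k, e)]).map Prod.snd).filter (fun x => x ≠ ""))) = ((pos + e.toList.length : Nat) : Int) := by
        rw [PySem.Str.len_eq, hcombL, List.length_append, htakelen]
      have hslice : (PySem.Str.slice target (some (pos : Int)) (some ((pos : Int) + PySem.Str.len e))).toList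
          = (target.toList.drop pos).take e.toList.length := by
        rw [PySem.Str.toList_slice, hlenE]
        simp only [PySem.Chars.slice_eq_listSlice]
        exact PySem.List.slice_natCast_add target.toList pos e.toList.length
      rw [if_pos he]
      by_cases hs : PySem.Str.slice target (some (pos : Int)) (some ((pos : Int) + PySem.Str.len e)) = e
      · have hsl : (target.toList.drop pos).take e.toList.length = e.toList := by
          rw [← hslice, hs]
        have hfit : pos + e.toList.length ≤ target.toList.length := by
          have := congrArg List.length hsl
          rw [List.length_take, List.length_drop] at this
          omega
        have hcomb2 : (PySem.Str.join "" (((w ++ [(k, e)]).map Prod.snd).filter (fun x => x ≠ ""))).toList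
            = target.toList.take (pos + e.toList.length) := by
          rw [hcombL, List.take_add, hsl]
        have hB1 : ¬ (PySem.Str.slice target (some (pos : Int)) (some ((pos : Int) + PySem.Str.len e)) ≠ e) := fun h => h hs
        by_cases hfull : pos + e.toList.length = target.toList.length
        · have hA1 : PySem.Str.join "" (((w ++ [(k, e)]).map Prod.snd).filter (fun x => x ≠ "")) = target := by
            rw [← String.toList_inj, hcomb2, hfull, List.take_length]
          have hB2 : (pos : Int) + PySem.Str.len e = PySem.Str.len target := by
            rw [hlenE, hLt]; exact_mod_cast hfull
          rw [if_pos hA1, if_neg hB1, if_pos hB2, pv_filter_snoc_ne w k e he]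
        · have hlt2 : pos + e.toList.length < target.toList.length := lt_of_le_of_ne hfit hfull
          have hA1 : ¬ (PySem.Str.join "" (((w ++ [(k, e)]).map Prod.snd).filter (fun x => x ≠ "")) = target) := by
            intro hcontra
            rw [← String.toList_inj, hcomb2] at hcontra
            have := congrArg List.length hcontra
            rw [List.length_take] at this
            omega
          have hA2 : ¬ (PySem.Str.len (PySem.Str.join "" (((w ++ [(k, e)]).map Prod.snd).filter (fun x => x ≠ ""))) > PySem.Str.len target) := by
            rw [hlenC, hLt]
            exact not_lt.mpr (Int.ofNat_le.mpr (le_of_lt hlt2))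
          have hB2 : ¬ ((pos : Int) + PySem.Str.len e = PySem.Str.len target) := by
            rw [hlenE, hLt]
            intro h
            exact hfull (by exact_mod_cast h)
          rw [if_neg hA1, if_neg hA2, if_neg hB1, if_neg hB2]
          have hih := ih (w ++ [(k, e)]) (pos + e.toList.length) (le_of_lt hlt2)
            (by rw [pvChars_append, hcs]; dsimp only; rw [List.take_add, hsl])
          have hcast : ((pos : Int) + PySem.Str.len e) = ((pos + e.toList.length : Nat) : Int) := by
            rw [hlenE]; push_cast; ring
          rw [hcast, hih, pv_filter_snoc_ne w k e he]
      · have hsl : (target.toList.drop pos).take e.toList.length ≠ e.toList := by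
          intro h
          exact hs (String.toList_inj.mp (by rw [hslice, h]))
        have hA1 : ¬ (PySem.Str.join "" (((w ++ [(k, e)]).map Prod.snd).filter (fun x => x ≠ "")) = target) := by
          intro hcontra
          rw [← String.toList_inj, hcombL] at hcontra
          apply hsl
          have hdrop : e.toList = target.toList.drop pos := by
            have h2 := congrArg (List.drop pos) hcontra
            rw [List.drop_left' htakelen] at h2
            exact h2
          rw [← hdrop]
          exact List.take_length
        rw [if_neg hA1, if_pos hs]
        by_cases hgt : target.toList.length < pos + e.toList.length
        · have hA2 : PySem.Str.len (PySem.Str.join "" (((w ++ [(k, e)]).map Prod.snd).filter (fun x => x ≠ ""))) > PySem.Str.len target := by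
            rw [hlenC, hLt]
            exact_mod_cast hgt
          rw [if_pos hA2]
        · have hA2 : ¬ (PySem.Str.len (PySem.Str.join "" (((w ++ [(k, e)]).map Prod.snd).filter (fun x => x ≠ ""))) > PySem.Str.len target) := by
            rw [hlenC, hLt]
            exact not_lt.mpr (Int.ofNat_le.mpr (not_lt.mp hgt))
          rw [if_neg hA2]
          apply pvAInner_none
          rw [pvChars_append, hcs]
          intro hpre
          apply hsl
          have h1 : e.toList <+: target.toList.drop pos := by
            have h2 : target.toList.take pos ++ e.toList <+: target.toList.take pos ++ target.toList.drop pos := by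
              rw [List.take_append_drop]; exact hpre
            exact (List.prefix_append_right_inj _).mp h2
          obtain ⟨t, ht⟩ := h1
          rw [← ht, List.take_left']
          rfl

lemma pv_outer_eq (target : String) (ps : List (Int × String)) :
    pvAOuter target ps = pvBOuter target ps := by
  induction ps with
  | nil => rfl
  | cons p rest ih =>
    rw [pvAOuter, pvBOuter]
    rw [pv_inner_eq target [] (p :: rest) 0 (by simp) (by simp [pvChars])]
    simp only [List.filter_nil, List.map_nil, Int.natCast_zero]
    split <;> simp_all

-- ===== VERDICT (by name: the statement is the Claim_ definition above) =====
theorem find_long_string_in_list_spec : Claim_equal_find_long_string_in_list := by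
  intro lst target _
  show _ = _
  unfold find_long_string_in_list find_long_string_in_list_alt
  exact pv_outer_eq target _
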